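-- pv_equiv track=rewrite | github.com/AndreaGold99/ALG-SARProject | distancia_th.py | cotamax_min
-- ===== SOURCE A (Python) =====
-- def cotamax_min(x,y):
--     """Funcion para comprobar las cotas y terminar antes la distancia de levensthein
--
--     Args:
--         x (string): Cadena a comparar
--         y (string): Cadena a comparar
--
--     Returns:
--         [int]: maximo entre la cota positiva y la negativa
--     """
--     #Creamos un diccionario
--     basedict = dict()
--     #Entrada para cada letra
--     for letter in (x+y):
--         basedict[letter] = 0
--     #Copias del diccionario
--     dictx = basedict.copy()
--     dicty = basedict.copy()
--     #Incremento positivo y negativo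
--     for letter in x:
--         dictx[letter] += 1
--     for letter in y:
--         dicty[letter] += 1
--     #Hacemos la resta
--     for key in basedict.keys():
--         basedict[key] = dictx[key] - dicty[key]
--     listacota = list(basedict.values())
--     #Sumatorio de cotas
--     cotamax = sum([x for x in listacota if x > 0])
--     cotamin = sum([-x for x in listacota if x < 0])
--     return max(cotamax,-cotamin)
-- ===== SOURCE B (Python) =====
-- def cotamax_min(x, y):
--     """Sort-and-merge reformulation: the bound equals len(x) minus the size of
--     the multiset intersection of x and y, computed by a two-pointer scan over
--     the two sorted character sequences (the negative branch of A never wins)."""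
--     sx = sorted(x)
--     sy = sorted(y)
--     i = j = common = 0
--     while i < len(sx) and j < len(sy):
--         if sx[i] == sy[j]:
--             common += 1
--             i += 1
--             j += 1
--         elif sx[i] < sy[j]:
--             i += 1
--         else:
--             j += 1
--     return len(sx) - common
-- ===== Notes on version B (the rewrite author's own statement) =====
-- stated objective: alternative
-- what changed: Replaces A's frequency dictionaries (base dict, two copies, subtraction loop, two filter-comprehensions) by sorting both strings and counting their multiset intersection with a two-pointer merge scan, returning len(x) - common, which equals A's bound since the negative branch of max(cotamax,-cotamin) never wins.
import Mathlib
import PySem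

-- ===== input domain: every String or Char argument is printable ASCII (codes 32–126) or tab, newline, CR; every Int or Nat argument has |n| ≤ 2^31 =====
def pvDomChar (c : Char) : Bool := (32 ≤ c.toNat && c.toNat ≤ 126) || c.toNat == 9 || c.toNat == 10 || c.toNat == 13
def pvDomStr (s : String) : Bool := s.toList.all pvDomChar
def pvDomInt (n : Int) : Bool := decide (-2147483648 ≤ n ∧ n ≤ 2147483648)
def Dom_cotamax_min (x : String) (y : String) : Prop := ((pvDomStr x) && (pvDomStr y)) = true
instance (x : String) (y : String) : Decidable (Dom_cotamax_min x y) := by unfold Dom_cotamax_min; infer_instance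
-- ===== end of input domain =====

-- B replaces A's frequency dictionaries by sort-and-merge: it sorts both strings and
-- counts their multiset intersection with a two-pointer scan, returning len(x) - common
-- (the negative branch of A's max never wins).

-- ===== PORT A =====
def cotamax_min (x : String) (y : String) : Int :=
  -- basedict: entry 0 for every letter of x+y
  let basedict := (x.toList ++ y.toList).foldl
      (fun d c => d.insert c (0 : Int)) PySem.Dict.empty
  -- dictx / dicty: copies of basedict, then += 1 per letter
  let dictx := x.toList.foldl (fun d c => d.insert c (d.getD c 0 + 1)) basedict
  let dicty := y.toList.foldl (fun d c => d.insert c (d.getD c 0 + 1)) basedict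
  -- subtraction written back into basedict
  let based2 := basedict.keys.foldl
      (fun d k => d.insert k (dictx.getD k 0 - dicty.getD k 0)) basedict
  let listacota := based2.values
  let cotamax := (listacota.filter (fun v => v > 0)).sum
  let cotamin := ((listacota.filter (fun v => v < 0)).map (fun v => -v)).sum
  max cotamax (-cotamin)

-- ===== PORT B =====
-- the two-pointer while loop of Source B, step for step (i/j pointers become the tails)
def pvMergeCommon : List Char → List Char → Nat
  | [], _ => 0
  | _ :: _, [] => 0
  | a :: as, b :: bs =>
      if a = b then pvMergeCommon as bs + 1
      else if a < b then pvMergeCommon as (b :: bs)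
      else pvMergeCommon (a :: as) bs
termination_by a b => a.length + b.length

def cotamax_min_alt (x : String) (y : String) : Int :=
  let sx := PySem.List.sorted x.toList (fun c => c) false
  let sy := PySem.List.sorted y.toList (fun c => c) false
  (sx.length : Int) - (pvMergeCommon sx sy : Int)

-- ===== PRECONDITION & SPEC =====
def Spec_cotamax_min (x : String) (y : String) (out : Int) : Prop := out = cotamax_min_alt x y
instance (x : String) (y : String) (out : Int) : Decidable (Spec_cotamax_min x y out) := by unfold Spec_cotamax_min; infer_instance

-- ===== CLAIM (what is proved, stated in full; the proofs are below) =====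
def Claim_equal_cotamax_min : Prop := ∀ (x : String) (y : String), Dom_cotamax_min x y → Spec_cotamax_min x y (cotamax_min x y)

-- ===== LEMMAS AND PROOFS =====

-- a foldl that inserts the constant 0 leaves every getD-with-default-0 at 0
theorem pv_getD_foldl_insert_zero (l : List Char) (d : PySem.Dict Char Int)
    (h : ∀ k, d.getD k 0 = 0) (k : Char) :
    (l.foldl (fun d c => d.insert c (0 : Int)) d).getD k 0 = 0 := by
  induction l generalizing d with
  | nil => exact h k
  | cons c t ih =>
      simp only [List.foldl_cons]
      exact ih _ (fun k' => by rw [PySem.Dict.getD_insert]; split <;> simp [h])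

-- a foldl over distinct keys inserting f k: getD afterwards
theorem pv_getD_foldl_insert_fun (ks : List Char) (f : Char → Int)
    (d : PySem.Dict Char Int) (hnd : ks.Nodup) (k : Char) :
    (ks.foldl (fun d k => d.insert k (f k)) d).getD k 0
      = if k ∈ ks then f k else d.getD k 0 := by
  induction ks generalizing d with
  | nil => simp
  | cons a t ih =>
      simp only [List.foldl_cons]
      rw [ih _ (List.Nodup.of_cons hnd)]
      by_cases hk : k ∈ t
      · simp [hk]
      · by_cases hka : k = a
        · subst hka; simp [hk, PySem.Dict.getD_insert_self]
        · rw [PySem.Dict.getD_insert_of_ne _ _ _ hka]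
          simp [hk, hka]

-- sum of the positive elements = sum of max(·,0)
theorem pv_sum_filter_pos (l : List Int) :
    (l.filter (fun v => v > 0)).sum = (l.map (fun v => max v 0)).sum := by
  induction l with
  | nil => rfl
  | cons a t ih =>
      by_cases h : a > 0
      · simp [h, ih, max_eq_left (le_of_lt h)]
      · simp [h, ih, max_eq_right (le_of_not_gt h)]

-- every element of the filtered-negated list is nonneg, so cotamin ≥ 0
theorem pv_sum_neg_filter_nonneg (l : List Int) :
    0 ≤ ((l.filter (fun v => v < 0)).map (fun v => -v)).sum := by
  apply List.sum_nonneg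
  intro v hv
  simp only [List.mem_map, List.mem_filter] at hv
  obtain ⟨w, ⟨_, hw⟩, rfl⟩ := hv
  simp at hw ⊢
  omega

theorem pv_sum_map_max_nonneg (l : List Char) (f : Char → Int) :
    0 ≤ (l.map (fun c => max (f c) 0)).sum := by
  apply List.sum_nonneg
  intro v hv
  simp only [List.mem_map] at hv
  obtain ⟨c, _, rfl⟩ := hv
  exact le_max_right _ _

-- A computes the sum of per-character positive surpluses of x over y
theorem pv_A_eq_surplus (x y : String) :
    cotamax_min x y
      = ((PySem.Set.ofList x.toList).map
          (fun c => max ((x.toList.count c : Int) - (y.toList.count c : Int)) 0)).sum := by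
  unfold cotamax_min
  dsimp only
  set lx := x.toList with hlx
  set ly := y.toList with hly
  set bd := (lx ++ ly).foldl (fun d c => d.insert c (0 : Int)) PySem.Dict.empty with hbd
  set dx := lx.foldl (fun d c => d.insert c (d.getD c 0 + 1)) bd with hdx
  set dy := ly.foldl (fun d c => d.insert c (d.getD c 0 + 1)) bd with hdy
  set b2 := bd.keys.foldl (fun d k => d.insert k (dx.getD k 0 - dy.getD k 0)) bd with hb2
  have hK : bd.keys = PySem.Set.ofList (lx ++ ly) := by
    rw [hbd, PySem.Dict.keys_foldl_insert]
    simp [PySem.Set.update_nil_left]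
  have hKnd : bd.keys.Nodup := by rw [hK]; exact PySem.Set.nodup_ofList _
  have hbd0 : ∀ k, bd.getD k 0 = 0 := fun k =>
    pv_getD_foldl_insert_zero _ _ (fun k => by simp) k
  have hdxv : ∀ k, dx.getD k 0 = (lx.count k : Int) := fun k => by
    rw [hdx, PySem.Dict.getD_foldl_insert_add_one, hbd0, zero_add]
  have hdyv : ∀ k, dy.getD k 0 = (ly.count k : Int) := fun k => by
    rw [hdy, PySem.Dict.getD_foldl_insert_add_one, hbd0, zero_add]
  have hb2v : ∀ k, b2.getD k 0 = (lx.count k : Int) - (ly.count k : Int) := by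
    intro k
    rw [hb2, pv_getD_foldl_insert_fun _ _ _ hKnd k]
    split
    · rw [hdxv, hdyv]
    · rename_i hkm
      have hnm : k ∉ lx ++ ly := by rwa [hK, PySem.Set.mem_ofList] at hkm
      simp only [List.mem_append, not_or] at hnm
      rw [hbd0, List.count_eq_zero.mpr hnm.1, List.count_eq_zero.mpr hnm.2]
      simp
  have hk2 : b2.keys = bd.keys := by
    rw [hb2, PySem.Dict.keys_foldl_insert, PySem.Set.update_eq_append_filter]
    have hnil : (PySem.Set.ofList bd.keys).filter (fun c => !(PySem.Set.contains bd.keys c)) = [] := by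
      apply List.filter_eq_nil_iff.mpr
      intro a ha
      rw [PySem.Set.mem_ofList] at ha
      simp [pysem, ha]
    rw [hnil, List.append_nil]
  have hk2nd : b2.keys.Nodup := hk2 ▸ hKnd
  have hvals : b2.values = bd.keys.map (fun k => (lx.count k : Int) - (ly.count k : Int)) := by
    rw [PySem.Dict.values_eq_map_keys b2 hk2nd 0, hk2]
    exact List.map_congr_left (fun k _ => hb2v k)
  have hpos : ((b2.values.filter (fun v => v > 0)).sum)
      = ((PySem.Set.ofList lx).map (fun c => max ((lx.count c : Int) - (ly.count c : Int)) 0)).sum := by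
    rw [pv_sum_filter_pos, hvals, List.map_map, hK, PySem.Set.ofList_append,
        PySem.Set.update_eq_append_filter, List.map_append, List.sum_append]
    have hz : ((((PySem.Set.ofList ly).filter (fun c => !(PySem.Set.contains (PySem.Set.ofList lx) c))).map
        ((fun v => max v 0) ∘ fun k => (lx.count k : Int) - (ly.count k : Int))).sum) = 0 := by
      apply List.sum_eq_zero
      intro v hv
      simp only [List.mem_map, List.mem_filter, Function.comp] at hv
      obtain ⟨c, ⟨_, hc⟩, rfl⟩ := hv
      have hcx : c ∉ lx := by simpa [pysem] using hc
      rw [List.count_eq_zero.mpr hcx]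
      have := Int.natCast_nonneg (ly.count c)
      simp only [Nat.cast_zero, zero_sub]
      omega
    rw [hz, add_zero]
    simp [Function.comp_def]
  rw [hpos]
  have h1 := pv_sum_neg_filter_nonneg b2.values
  have h2 := pv_sum_map_max_nonneg (PySem.Set.ofList lx)
      (fun c => (lx.count c : Int) - (ly.count c : Int))
  exact max_eq_left (by omega)

-- the two-pointer merge on sorted lists counts the multiset intersection
theorem pv_mergeCommon_eq_inter_card (a b : List Char)
    (ha : a.Pairwise (· ≤ ·)) (hb : b.Pairwise (· ≤ ·)) :
    (pvMergeCommon a b : ℕ) = ((a : Multiset Char) ∩ (b : Multiset Char)).card := by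
  fun_induction pvMergeCommon a b with
  | case1 t => simp
  | case2 h t => simp
  | case3 as b bs ih =>
      rw [ih ha.of_cons hb.of_cons, ← Multiset.cons_coe, ← Multiset.cons_coe,
          Multiset.cons_inter_of_pos _ (Multiset.mem_cons_self b _)]
      simp
  | case4 a as b bs hne hlt ih =>
      have hnot : a ∉ (↑(b :: bs) : Multiset Char) := by
        simp only [Multiset.mem_coe, List.mem_cons]
        rintro (rfl | hmem)
        · exact hne rfl
        · exact absurd hlt (not_lt.mpr (List.rel_of_pairwise_cons hb hmem))
      rw [ih ha.of_cons hb, ← Multiset.cons_coe a as, Multiset.cons_inter_of_neg _ hnot]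
  | case5 a as b bs hne hnlt ih =>
      have hba : b < a := lt_of_le_of_ne (not_lt.mp hnlt) (fun h => hne h.symm)
      have hnot : b ∉ (↑(a :: as) : Multiset Char) := by
        simp only [Multiset.mem_coe, List.mem_cons]
        rintro (rfl | hmem)
        · exact hne rfl
        · exact absurd hba (not_lt.mpr (List.rel_of_pairwise_cons ha hmem))
      rw [ih ha hb.of_cons, Multiset.inter_comm, ← Multiset.cons_coe b bs,
          Multiset.inter_comm (↑(a :: as) : Multiset Char),
          Multiset.cons_inter_of_neg _ hnot]

-- surplus sum = len(x) - |x ∩ y| (as multisets)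
theorem pv_surplus_eq_len_sub_inter (lx ly : List Char) :
    ((PySem.Set.ofList lx).map
        (fun c => max ((lx.count c : Int) - (ly.count c : Int)) 0)).sum
      = (lx.length : Int) - (((lx : Multiset Char) ∩ (ly : Multiset Char)).card : Int) := by
  -- list sum over the nodup set = Finset sum over lx.toFinset
  have hset : ((PySem.Set.ofList lx).map
        (fun c => max ((lx.count c : Int) - (ly.count c : Int)) 0)).sum
      = ∑ c ∈ lx.toFinset, max ((lx.count c : Int) - (ly.count c : Int)) 0 := by
    rw [← List.sum_toFinset _ (PySem.Set.nodup_ofList lx)]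
    congr 1
    apply Finset.ext
    intro c
    simp [PySem.Set.mem_ofList]
  -- pointwise: max (cx - cy) 0 = cx - min cx cy
  have hpt : ∀ c, max ((lx.count c : Int) - (ly.count c : Int)) 0
      = (lx.count c : Int) - (min (lx.count c) (ly.count c) : Nat) := by
    intro c; omega
  -- sum of min over lx.toFinset = intersection cardinality
  have hmin : ∑ c ∈ lx.toFinset, (min (lx.count c) (ly.count c)) =
      ((lx : Multiset Char) ∩ (ly : Multiset Char)).card := by
    rw [← Multiset.toFinset_sum_count_eq ((lx : Multiset Char) ∩ (ly : Multiset Char))]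
    have hcong : ∑ a ∈ ((lx : Multiset Char) ∩ (ly : Multiset Char)).toFinset,
        Multiset.count a ((lx : Multiset Char) ∩ (ly : Multiset Char))
        = ∑ a ∈ ((lx : Multiset Char) ∩ (ly : Multiset Char)).toFinset, min (lx.count a) (ly.count a) :=
      Finset.sum_congr rfl (fun c _ => by
        rw [Multiset.count_inter, Multiset.coe_count, Multiset.coe_count])
    rw [hcong]
    symm
    apply Finset.sum_subset
    · intro c hc
      have := Multiset.mem_toFinset.mp hc
      have hcx : c ∈ lx := Multiset.mem_coe.mp (Multiset.mem_of_le Multiset.inter_le_left this)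
      exact List.mem_toFinset.mpr hcx
    · intro c _ hc
      have h0 : ((lx : Multiset Char) ∩ (ly : Multiset Char)).count c = 0 := by
        exact Multiset.count_eq_zero.mpr (fun hm => hc (Multiset.mem_toFinset.mpr hm))
      rw [Multiset.count_inter, Multiset.coe_count, Multiset.coe_count] at h0
      omega
  rw [hset]
  calc ∑ c ∈ lx.toFinset, max ((lx.count c : Int) - (ly.count c : Int)) 0
      = ∑ c ∈ lx.toFinset, ((lx.count c : Int) - (min (lx.count c) (ly.count c) : Nat)) :=
        Finset.sum_congr rfl (fun c _ => hpt c)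
    _ = (∑ c ∈ lx.toFinset, (lx.count c : Int)) - ∑ c ∈ lx.toFinset, ((min (lx.count c) (ly.count c) : Nat) : Int) :=
        by rw [Finset.sum_sub_distrib]
    _ = (lx.length : Int) - (((lx : Multiset Char) ∩ (ly : Multiset Char)).card : Int) := by
        rw [← Nat.cast_sum, ← Nat.cast_sum, List.sum_toFinset_count_eq_length, hmin]

-- ===== VERDICT (by name: the statement is the Claim_ definition above) =====
theorem cotamax_min_spec : Claim_equal_cotamax_min := by
  intro x y _
  unfold Spec_cotamax_min cotamax_min_alt
  dsimp only
  rw [pv_A_eq_surplus, pv_surplus_eq_len_sub_inter]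
  have hpx := PySem.List.sorted_perm x.toList (fun c => c) false
  have hpy := PySem.List.sorted_perm y.toList (fun c => c) false
  rw [pv_mergeCommon_eq_inter_card _ _
        (by simpa using PySem.List.sorted_pairwise x.toList (fun c => c))
        (by simpa using PySem.List.sorted_pairwise y.toList (fun c => c))]
  rw [Multiset.coe_eq_coe.mpr hpx, Multiset.coe_eq_coe.mpr hpy, hpx.length_eq]
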